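-- pv_equiv track=rewrite | github.com/cmbenello/141-discussion-final | solutions/lists_tuples_sols.py | lt_25_argmin_argmax
-- ===== SOURCE A (Python) =====
-- from typing import Any, List, Optional, Tuple
--
-- def lt_25_argmin_argmax(nums: List[int]) -> Optional[Tuple[int, int]]:
--     if not nums:
--         return None
--     min_idx = max_idx = 0
--     min_val = max_val = nums[0]
--     for i in range(1, len(nums)):
--         val = nums[i]
--         if val < min_val:
--             min_val = val
--             min_idx = i
--         if val > max_val:
--             max_val = val
--             max_idx = i
--     return min_idx, max_idx
-- ===== SOURCE B (Python) =====
-- def lt_25_argmin_argmax(nums):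
--     if not nums:
--         return None
--     indices = range(len(nums))
--     return (min(indices, key=nums.__getitem__),
--             max(indices, key=nums.__getitem__))
-- ===== Notes on version B (the rewrite author's own statement) =====
-- stated objective: idiomatic
-- what changed: Replaces the single interleaved index/value tracking loop with two independent library-driven scans: min and max over range(len(nums)) with nums.__getitem__ as key, which pick the first extremal index just like A's strict-inequality updates.
import Mathlib
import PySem

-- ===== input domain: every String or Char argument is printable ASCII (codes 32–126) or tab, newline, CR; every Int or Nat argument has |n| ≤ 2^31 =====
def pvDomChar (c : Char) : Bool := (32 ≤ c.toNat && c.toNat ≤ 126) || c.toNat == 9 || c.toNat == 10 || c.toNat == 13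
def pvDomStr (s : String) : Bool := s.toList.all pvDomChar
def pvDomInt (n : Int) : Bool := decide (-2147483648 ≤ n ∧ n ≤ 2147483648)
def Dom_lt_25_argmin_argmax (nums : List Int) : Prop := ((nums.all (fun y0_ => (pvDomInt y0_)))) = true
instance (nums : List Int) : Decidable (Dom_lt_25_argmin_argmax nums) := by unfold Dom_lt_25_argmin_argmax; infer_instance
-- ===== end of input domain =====

-- B replaces A's single interleaved min/max tracking loop by two independent
-- first-extremal scans (min/max over the index range with the list lookup as key); idiomatic, same O(n) cost.


-- ===== PORT A =====
-- state: (min_idx, max_idx, min_val, max_val)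
def lt_25_argmin_argmax (nums : List Int) : Option (Int × Int) :=
  match nums with
  | [] => none
  | v :: _ =>
    let s := (PySem.List.pyRange 1 (nums.length : Int) 1).foldl
      (fun st i =>
        let val := PySem.List.pyGetD nums i 0
        let st1 := if val < st.2.2.1 then (i, st.2.1, val, st.2.2.2) else st
        if st1.2.2.2 < val then (st1.1, i, st1.2.2.1, val) else st1)
      ((0 : Int), (0 : Int), v, v)
    some (s.1, s.2.1)

-- ===== PORT B =====
def lt_25_argmin_argmax_alt (nums : List Int) : Option (Int × Int) :=
  match nums with
  | [] => none
  | _ :: _ =>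
    let key := fun i => PySem.List.pyGetD nums i 0
    let indices := PySem.List.pyRange 0 (nums.length : Int) 1
    match PySem.List.min? indices key, PySem.List.max? indices key with
    | some mi, some ma => some (mi, ma)
    | _, _ => none

-- ===== PRECONDITION & SPEC =====
def Spec_lt_25_argmin_argmax (nums : List Int) (out : Option (Int × Int)) : Prop := out = lt_25_argmin_argmax_alt nums
instance (nums : List Int) (out : Option (Int × Int)) : Decidable (Spec_lt_25_argmin_argmax nums out) := by unfold Spec_lt_25_argmin_argmax; infer_instance

-- ===== CLAIM (what is proved, stated in full; the proofs are below) =====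
def Claim_equal_lt_25_argmin_argmax : Prop := ∀ (nums : List Int), Dom_lt_25_argmin_argmax nums → Spec_lt_25_argmin_argmax nums (lt_25_argmin_argmax nums)

-- ===== LEMMAS AND PROOFS =====

-- proof-side name for A's loop body (identical to the lambda in the port; used only by the lemmas)
def pvStep (nums : List Int) : (Int × Int × Int × Int) → Int → (Int × Int × Int × Int) :=
  fun st i =>
    let val := PySem.List.pyGetD nums i 0
    let st1 := if val < st.2.2.1 then (i, st.2.1, val, st.2.2.2) else st
    if st1.2.2.2 < val then (st1.1, i, st1.2.2.1, val) else st1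

theorem pv_min_snoc {key : Int → Int} (xs : List Int) (x m : Int)
    (h : PySem.List.min? xs key = some m) :
    PySem.List.min? (xs ++ [x]) key = if key x < key m then some x else some m := by
  simp [PySem.List.min?, List.foldl_append] at h ⊢
  rw [h]

theorem pv_max_snoc {key : Int → Int} (xs : List Int) (x m : Int)
    (h : PySem.List.max? xs key = some m) :
    PySem.List.max? (xs ++ [x]) key = if key m < key x then some x else some m := by
  simp [PySem.List.max?, List.foldl_append] at h ⊢
  rw [h]

-- the invariant: after A's loop has processed indices 1..b-1, its state (mi, ma, mv, Mv)
-- is exactly what B's two scans over indices 0..b-1 produce, with mv/Mv the keys of mi/ma.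
theorem pv_inv (v : Int) (t : List Int) (b : Int) (hb : 1 ≤ b) :
    ∀ s : Int × Int × Int × Int,
      s = (PySem.List.pyRange 1 b 1).foldl (pvStep (v :: t)) ((0 : Int), (0 : Int), v, v) →
      PySem.List.min? (PySem.List.pyRange 0 b 1) (fun i => PySem.List.pyGetD (v :: t) i 0) = some s.1 ∧
      PySem.List.pyGetD (v :: t) s.1 0 = s.2.2.1 ∧
      PySem.List.max? (PySem.List.pyRange 0 b 1) (fun i => PySem.List.pyGetD (v :: t) i 0) = some s.2.1 ∧
      PySem.List.pyGetD (v :: t) s.2.1 0 = s.2.2.2 := by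
  induction b, hb using Int.le_induction with
  | base =>
    intro s hs
    rw [PySem.List.pyRange_one_eq_nil (le_refl 1)] at hs
    simp at hs
    subst hs
    simp [show PySem.List.pyRange 0 1 1 = [0] from PySem.List.pyRange_one_singleton 0,
      PySem.List.min?, PySem.List.max?, PySem.List.pyGetD_zero_cons]
  | succ b hb ih =>
    intro s hs
    obtain ⟨ihmin, ihkmin, ihmax, ihkmax⟩ :=
      ih ((PySem.List.pyRange 1 b 1).foldl (pvStep (v :: t)) ((0 : Int), (0 : Int), v, v)) rfl
    rw [PySem.List.pyRange_one_succ_right hb, List.foldl_append] at hs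
    rw [PySem.List.pyRange_one_succ_right (by omega : (0 : Int) ≤ b)]
    revert ihmin ihkmin ihmax ihkmax hs
    generalize (PySem.List.pyRange 1 b 1).foldl (pvStep (v :: t)) ((0 : Int), (0 : Int), v, v) = s0
    intro hs ihmin ihkmin ihmax ihkmax
    rw [pv_min_snoc _ _ _ ihmin, pv_max_snoc _ _ _ ihmax, ihkmin, ihkmax]
    simp only [List.foldl_cons, List.foldl_nil] at hs
    unfold pvStep at hs
    simp only [] at hs
    subst hs
    by_cases hlt : PySem.List.pyGetD (v :: t) b 0 < s0.2.2.1 <;>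
      by_cases hgt : s0.2.2.2 < PySem.List.pyGetD (v :: t) b 0 <;>
      simp [hlt, hgt, ihkmin, ihkmax]

-- ===== VERDICT (by name: the statement is the Claim_ definition above) =====
theorem lt_25_argmin_argmax_spec : Claim_equal_lt_25_argmin_argmax := by
  intro nums _
  unfold Spec_lt_25_argmin_argmax
  match nums with
  | [] => rfl
  | v :: t =>
    have hb : (1 : Int) ≤ ((v :: t).length : Int) := by
      simp only [List.length_cons]; omega
    obtain ⟨hmin, _, hmax, _⟩ := pv_inv v t ((v :: t).length : Int) hb
      ((PySem.List.pyRange 1 ((v :: t).length : Int) 1).foldl (pvStep (v :: t))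
        ((0 : Int), (0 : Int), v, v)) rfl
    have hA : lt_25_argmin_argmax (v :: t) =
        some (((PySem.List.pyRange 1 ((v :: t).length : Int) 1).foldl (pvStep (v :: t))
          ((0 : Int), (0 : Int), v, v)).1,
          ((PySem.List.pyRange 1 ((v :: t).length : Int) 1).foldl (pvStep (v :: t))
            ((0 : Int), (0 : Int), v, v)).2.1) := rfl
    rw [hA]
    simp only [lt_25_argmin_argmax_alt]
    rw [hmin, hmax]
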